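-- pv_equiv track=rewrite | github.com/youandpython/Python2002 | 0208-116-4.py | list_true
-- ===== SOURCE A (Python) =====
-- def list_true(list_object):
--     count = {}
--     for li in list_object:
--         count[li] = count.get(li, 0) + 1
--
--     for val in count.values():
--         if val > 1:
--             return True
--     else:
--         return False
-- ===== SOURCE B (Python) =====
-- def list_true(list_object):
--     s = sorted(list_object)
--     return any(x == y for x, y in zip(s, s[1:]))
-- ===== Notes on version B (the rewrite author's own statement) =====
-- stated objective: alternative
-- what changed: Replaces the hash-based count-dictionary build plus a scan over the counts with a comparison-based algorithm: sort the list and report whether any two adjacent elements of the sorted list are equal (no hashing, no tallying).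
import Mathlib
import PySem

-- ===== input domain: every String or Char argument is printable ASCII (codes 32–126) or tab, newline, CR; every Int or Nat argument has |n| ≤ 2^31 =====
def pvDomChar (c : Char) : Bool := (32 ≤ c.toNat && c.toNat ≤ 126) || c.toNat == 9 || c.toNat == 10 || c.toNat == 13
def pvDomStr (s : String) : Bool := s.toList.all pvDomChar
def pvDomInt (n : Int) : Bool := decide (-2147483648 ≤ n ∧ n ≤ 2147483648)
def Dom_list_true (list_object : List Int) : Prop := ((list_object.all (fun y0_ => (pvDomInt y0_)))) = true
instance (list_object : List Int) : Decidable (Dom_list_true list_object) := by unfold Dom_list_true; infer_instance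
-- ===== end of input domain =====

-- ===== PORT A =====
-- B replaces A's hash/count tallying with sort-then-adjacent-scan (different algorithm, similar cost).
-- values-scan loop of A: return True on the first count > 1, else False
def pvScanVals : List Int → Bool
  | [] => false
  | v :: rest => if v > 1 then true else pvScanVals rest

def list_true (list_object : List Int) : Bool :=
  let count : PySem.Dict Int Int :=
    list_object.foldl (fun d li => d.insert li (d.getD li 0 + 1)) PySem.Dict.empty
  pvScanVals count.values

-- ===== PORT B =====
def list_true_alt (list_object : List Int) : Bool :=
  ((PySem.List.sorted list_object (fun x => x) false).zip
    (PySem.List.slice (PySem.List.sorted list_object (fun x => x) false) (some 1) none)).any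
    (fun p => p.1 == p.2)

-- ===== PRECONDITION & SPEC =====
def Spec_list_true (list_object : List Int) (out : Bool) : Prop := out = list_true_alt list_object
instance (list_object : List Int) (out : Bool) : Decidable (Spec_list_true list_object out) := by unfold Spec_list_true; infer_instance

-- ===== CLAIM (what is proved, stated in full; the proofs are below) =====
def Claim_equal_list_true : Prop := ∀ (list_object : List Int), Dom_list_true list_object → Spec_list_true list_object (list_true list_object)

-- ===== LEMMAS AND PROOFS =====

theorem pvScanVals_eq_any (vs : List Int) : pvScanVals vs = vs.any (fun v => decide (v > 1)) := by
  induction vs with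
  | nil => rfl
  | cons v rest ih => simp [pvScanVals, ih]

theorem pvFold_eq_counter (xs : List Int) :
    xs.foldl (fun d li => d.insert li (d.getD li 0 + 1)) PySem.Dict.empty = PySem.Dict.counter xs := by
  rw [PySem.Dict.counter_eq_foldl]
  rfl

-- A returns exactly "xs is not duplicate-free"
theorem list_true_eq_nodup (xs : List Int) : list_true xs = !decide xs.Nodup := by
  unfold list_true
  rw [pvFold_eq_counter, pvScanVals_eq_any]
  have hvals : (PySem.Dict.counter xs).values = (PySem.Set.ofList xs).map (fun k => (xs.count k : Int)) := by
    show ((PySem.Dict.counter xs).items).map (·.2) = _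
    rw [PySem.Dict.items_counter]
    simp
  rw [hvals, List.any_map]
  by_cases hnd : xs.Nodup
  · simp only [hnd, decide_true, Bool.not_true]
    rw [List.any_eq_false]
    intro k hk
    have := List.nodup_iff_count_le_one.mp hnd k
    simp only [Function.comp_apply, decide_eq_true_eq, gt_iff_lt]
    omega
  · simp only [hnd, decide_false, Bool.not_false]
    rw [List.any_eq_true]
    have hex : ∃ k, 1 < xs.count k := by
      by_contra hall
      push Not at hall
      exact hnd (List.nodup_iff_count_le_one.mpr fun k => hall k)
    obtain ⟨k, hk⟩ := hex
    refine ⟨k, ?_, ?_⟩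
    · rw [PySem.Set.mem_ofList]
      exact List.count_pos_iff.mp (by omega)
    · simp only [Function.comp_apply, decide_eq_true_iff]
      exact_mod_cast hk

-- adjacent-pair scan of a (≤)-sorted list detects exactly non-Nodup
theorem pvAdj_eq_nodup (s : List Int) (hs : s.Pairwise (· ≤ ·)) :
    (s.zip s.tail).any (fun p => p.1 == p.2) = !decide s.Nodup := by
  induction s with
  | nil => rfl
  | cons a t ih =>
    cases t with
    | nil => simp
    | cons b t' =>
      have hab : a ≤ b := (List.pairwise_cons.mp hs).1 b (by simp)
      have hrest := (List.pairwise_cons.mp hs).2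
      have ih' := ih hrest
      simp only [List.tail_cons, List.zip_cons_cons, List.any_cons] at ih' ⊢
      by_cases heq : a = b
      · subst heq
        simp only [beq_self_eq_true, Bool.true_or]
        have h2 : ¬ (a :: a :: t').Nodup := by
          intro h
          exact (List.nodup_cons.mp h).1 (List.mem_cons_self)
        simp [h2]
      · have hlt : a < b := lt_of_le_of_ne hab heq
        have hnotmem : a ∉ b :: t' := by
          intro hmem
          rcases List.mem_cons.mp hmem with h | h
          · exact absurd h heq
          · have := ((List.pairwise_cons.mp hrest).1 a h)
            omega
        have : ((a :: b :: t').Nodup) ↔ ((b :: t').Nodup) := by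
          constructor
          · exact fun h => h.of_cons
          · exact fun h => List.nodup_cons.mpr ⟨hnotmem, h⟩
        have hbf : (a == b) = false := by simpa using heq
        rw [hbf, Bool.false_or, ih']
        by_cases hn : (b :: t').Nodup
        · simp [hn, this.mpr hn]
        · simp [hn, mt this.mp hn]

theorem list_true_alt_eq_nodup (xs : List Int) : list_true_alt xs = !decide xs.Nodup := by
  unfold list_true_alt
  rw [PySem.List.slice_from_one, pvAdj_eq_nodup _ (PySem.List.sorted_pairwise xs (fun x => x))]
  have hperm := PySem.List.sorted_perm xs (fun x => x) false
  simp [hperm.nodup_iff]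

-- ===== VERDICT (by name: the statement is the Claim_ definition above) =====
theorem list_true_spec : Claim_equal_list_true := by
  intro xs _
  show list_true xs = list_true_alt xs
  rw [list_true_eq_nodup, list_true_alt_eq_nodup]
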